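-- pv_equiv track=rewrite | github.com/adam42739/btsdatapy | src/btsdatapy/core/utils/dates.py | iterate_year_months
-- ===== SOURCE A (Python) =====
-- def iterate_year_months(
--     start: tuple[int, int],
--     end: tuple[int, int],
--     year_key: str = "cboYear",
--     month_key: str = "cboPeriod",
-- ) -> list[dict[str, str]]:
--     start_year, start_month = start
--     end_year, end_month = end
--
--     year_months = []
--     for year in range(start_year, end_year + 1):
--         month_start = start_month if year == start_year else 1
--         month_end = end_month if year == end_year else 12
--         for month in range(month_start, month_end + 1):
--             year_months.append({year_key: str(year), month_key: str(month)})
--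
--     return year_months
-- ===== SOURCE B (Python) =====
-- def iterate_year_months(
--     start: tuple[int, int],
--     end: tuple[int, int],
--     year_key: str = "cboYear",
--     month_key: str = "cboPeriod",
-- ) -> list[dict[str, str]]:
--     start_year, start_month = start
--     end_year, end_month = end
--
--     def entry(year, month):
--         return {year_key: str(year), month_key: str(month)}
--
--     if end_year < start_year:
--         return []
--     if start_year == end_year:
--         return [entry(start_year, m) for m in range(start_month, end_month + 1)]
--     # first partial year, then full middle years as one flat month-index pass, then last partial year
--     out = [entry(start_year, m) for m in range(start_month, 13)]
--     out += [entry(i // 12, i % 12 + 1)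
--             for i in range((start_year + 1) * 12, end_year * 12)]
--     out += [entry(end_year, m) for m in range(1, end_month + 1)]
--     return out
-- ===== Notes on version B (the rewrite author's own statement) =====
-- stated objective: alternative
-- what changed: Replaces the nested year/month loops with per-year boundary conditionals by three concatenated segments: the first partial year, all full middle years decoded from one flat absolute-month-index pass (year = i//12, month = i%12+1), and the last partial year.
import Mathlib
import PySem

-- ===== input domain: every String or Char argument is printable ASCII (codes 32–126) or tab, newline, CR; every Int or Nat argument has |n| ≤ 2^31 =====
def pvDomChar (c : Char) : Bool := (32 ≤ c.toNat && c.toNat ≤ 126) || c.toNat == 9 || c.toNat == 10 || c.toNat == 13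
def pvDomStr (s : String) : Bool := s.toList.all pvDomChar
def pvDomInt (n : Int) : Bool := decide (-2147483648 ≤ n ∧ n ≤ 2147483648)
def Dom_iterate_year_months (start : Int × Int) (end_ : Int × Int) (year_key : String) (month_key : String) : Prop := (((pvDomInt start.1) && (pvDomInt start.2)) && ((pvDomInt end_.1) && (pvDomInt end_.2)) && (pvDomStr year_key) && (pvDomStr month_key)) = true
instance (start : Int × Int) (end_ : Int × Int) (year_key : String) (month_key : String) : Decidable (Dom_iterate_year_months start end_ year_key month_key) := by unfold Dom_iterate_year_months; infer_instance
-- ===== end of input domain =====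

-- B replaces A's nested year/month loops (with per-year boundary conditionals) by three
-- concatenated segments: first partial year, full middle years decoded from one flat
-- absolute-month-index pass, last partial year; same cost, different decomposition.


-- ===== PORT A =====
def iterate_year_months (start : Int × Int) (end_ : Int × Int) (year_key : String) (month_key : String) : List (List (String × String)) :=
  let start_year := start.1
  let start_month := start.2
  let end_year := end_.1
  let end_month := end_.2
  (PySem.List.pyRange start_year (end_year + 1) 1).foldl
    (fun year_months year =>
      let month_start := if year = start_year then start_month else 1
      let month_end := if year = end_year then end_month else 12
      (PySem.List.pyRange month_start (month_end + 1) 1).foldl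
        (fun ym month =>
          ym ++ [((PySem.Dict.empty.insert year_key (PySem.Int.toStr year)).insert month_key (PySem.Int.toStr month)).items])
        year_months)
    []

-- ===== PORT B =====
-- Source B's local helper 'entry'
def pvEntry (year_key month_key : String) (year month : Int) : List (String × String) :=
  ((PySem.Dict.empty.insert year_key (PySem.Int.toStr year)).insert month_key (PySem.Int.toStr month)).items

def iterate_year_months_alt (start : Int × Int) (end_ : Int × Int) (year_key : String) (month_key : String) : List (List (String × String)) :=
  let start_year := start.1
  let start_month := start.2
  let end_year := end_.1
  let end_month := end_.2
  if end_year < start_year then []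
  else if start_year = end_year then
    (PySem.List.pyRange start_month (end_month + 1) 1).map (fun m => pvEntry year_key month_key start_year m)
  else
    ((PySem.List.pyRange start_month 13 1).map (fun m => pvEntry year_key month_key start_year m))
    ++ ((PySem.List.pyRange ((start_year + 1) * 12) (end_year * 12) 1).map
          (fun i => pvEntry year_key month_key (PySem.Int.floordiv i 12) (PySem.Int.mod i 12 + 1)))
    ++ ((PySem.List.pyRange 1 (end_month + 1) 1).map (fun m => pvEntry year_key month_key end_year m))

-- ===== PRECONDITION & SPEC =====
def Spec_iterate_year_months (start : Int × Int) (end_ : Int × Int) (year_key : String) (month_key : String) (out : List (List (String × String))) : Prop := out = iterate_year_months_alt start end_ year_key month_key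
instance (start : Int × Int) (end_ : Int × Int) (year_key : String) (month_key : String) (out : List (List (String × String))) : Decidable (Spec_iterate_year_months start end_ year_key month_key out) := by unfold Spec_iterate_year_months; infer_instance

-- ===== CLAIM (what is proved, stated in full; the proofs are below) =====
def Claim_equal_iterate_year_months : Prop := ∀ (start : Int × Int) (end_ : Int × Int) (year_key : String) (month_key : String), Dom_iterate_year_months start end_ year_key month_key → Spec_iterate_year_months start end_ year_key month_key (iterate_year_months start end_ year_key month_key)

-- ===== LEMMAS AND PROOFS =====

-- pointwise congruence for flatMap
theorem pv_flatMap_congr {α β : Type} {f g : α → List β} : ∀ (l : List α), (∀ x ∈ l, f x = g x) → l.flatMap f = l.flatMap g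
  | [], _ => rfl
  | x :: xs, h => by
    simp only [List.flatMap_cons]
    rw [h x (by simp), pv_flatMap_congr xs (fun y hy => h y (by simp [hy]))]

-- A as a flatMap over the year range
theorem pv_A_flatMap (start end_ : Int × Int) (yk mk : String) :
    iterate_year_months start end_ yk mk =
      (PySem.List.pyRange start.1 (end_.1 + 1) 1).flatMap (fun year =>
        (PySem.List.pyRange (if year = start.1 then start.2 else 1)
            ((if year = end_.1 then end_.2 else 12) + 1) 1).map
          (fun month => pvEntry yk mk year month)) := by
  unfold iterate_year_months pvEntry
  simp only [PySem.List.foldl_append_singleton_eq_map, PySem.List.foldl_append_eq_flatMap,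
    List.nil_append]

-- one full year, decoded from the flat month index
theorem pv_one_year (yk mk : String) (a : Int) :
    (PySem.List.pyRange (a * 12) (a * 12 + 12) 1).map
        (fun i => pvEntry yk mk (PySem.Int.floordiv i 12) (PySem.Int.mod i 12 + 1))
      = (PySem.List.pyRange 1 13 1).map (fun m => pvEntry yk mk a m) := by
  rw [PySem.List.pyRange_one (a * 12) (a * 12 + 12), PySem.List.pyRange_one 1 13]
  have h12 : (a * 12 + 12 - a * 12).toNat = 12 := by omega
  have h12' : ((13 : Int) - 1).toNat = 12 := by omega
  rw [h12, h12', List.map_map, List.map_map]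
  apply List.map_congr_left
  intro k hk
  have hklt : k < 12 := List.mem_range.mp hk
  have hdiv : PySem.Int.floordiv (a * 12 + (k : Int)) 12 = a := by
    rw [PySem.Int.floordiv_eq_iff_of_pos (by omega)]
    omega
  have hmod : PySem.Int.mod (a * 12 + (k : Int)) 12 = (k : Int) := by
    have := PySem.Int.floordiv_mul_add_mod (a * 12 + (k : Int)) 12
    rw [hdiv] at this
    omega
  simp only [Function.comp_apply, hdiv, hmod]
  congr 1
  omega

-- consecutive full years = one flat month-index pass
theorem pv_mid (yk mk : String) : ∀ (n : Nat) (a : Int),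
    (PySem.List.pyRange a (a + n) 1).flatMap (fun y => (PySem.List.pyRange 1 13 1).map (fun m => pvEntry yk mk y m))
      = (PySem.List.pyRange (a * 12) ((a + n) * 12) 1).map
          (fun i => pvEntry yk mk (PySem.Int.floordiv i 12) (PySem.Int.mod i 12 + 1))
  | 0, a => by
    have h : a + ((0 : Nat) : Int) = a := by push_cast; ring
    rw [h, PySem.List.pyRange_one_eq_nil le_rfl, PySem.List.pyRange_one_eq_nil le_rfl]
    rfl
  | n + 1, a => by
    have hcons : PySem.List.pyRange a (a + ((n + 1 : Nat) : Int)) 1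
        = a :: PySem.List.pyRange (a + 1) (a + ((n + 1 : Nat) : Int)) 1 :=
      PySem.List.pyRange_one_cons (by push_cast; omega)
    rw [hcons, List.flatMap_cons]
    have hstep : a + ((n : Int) + 1) = (a + 1) + n := by ring
    have hsplit : PySem.List.pyRange (a * 12) ((a + ((n : Nat) + 1 : Nat)) * 12) 1
        = PySem.List.pyRange (a * 12) (a * 12 + 12) 1
          ++ PySem.List.pyRange ((a + 1) * 12) ((a + ((n + 1 : Nat) : Int)) * 12) 1 := by
      have h1 : a * 12 + 12 = (a + 1) * 12 := by ring
      rw [h1]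
      exact PySem.List.pyRange_one_append (a * 12) ((a + 1) * 12) ((a + ((n + 1 : Nat) : Int)) * 12)
        (by omega) (by push_cast; nlinarith)
    rw [hsplit, List.map_append, ← pv_one_year yk mk a]
    congr 1
    have := pv_mid yk mk n (a + 1)
    have hb : (a + 1) + (n : Int) = a + ((n + 1 : Nat) : Int) := by push_cast; ring
    rw [hb] at this
    exact this

-- ===== VERDICT (by name: the statement is the Claim_ definition above) =====
theorem iterate_year_months_spec : Claim_equal_iterate_year_months := by
  intro start end_ yk mk _
  unfold Spec_iterate_year_months
  rw [pv_A_flatMap]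
  unfold iterate_year_months_alt
  obtain ⟨sy, sm⟩ := start
  obtain ⟨ey, em⟩ := end_
  simp only
  by_cases hlt : ey < sy
  · rw [if_pos hlt, PySem.List.pyRange_one_eq_nil (by omega)]
    rfl
  · rw [if_neg hlt]
    by_cases heq : sy = ey
    · subst heq
      rw [if_pos rfl]
      have : PySem.List.pyRange sy (sy + 1) 1 = [sy] := PySem.List.pyRange_one_singleton sy
      rw [this]
      simp
    · rw [if_neg heq]
      have hslt : sy < ey := by omega
      -- split the year range into [sy], middle, [ey]
      have hsplit1 : PySem.List.pyRange sy (ey + 1) 1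
          = PySem.List.pyRange sy (sy + 1) 1 ++ PySem.List.pyRange (sy + 1) (ey + 1) 1 :=
        PySem.List.pyRange_one_append sy (sy + 1) (ey + 1) (by omega) (by omega)
      have hsplit2 : PySem.List.pyRange (sy + 1) (ey + 1) 1
          = PySem.List.pyRange (sy + 1) ey 1 ++ PySem.List.pyRange ey (ey + 1) 1 :=
        PySem.List.pyRange_one_append (sy + 1) ey (ey + 1) (by omega) (by omega)
      rw [hsplit1, hsplit2, PySem.List.pyRange_one_singleton, PySem.List.pyRange_one_singleton,
        List.flatMap_append, List.flatMap_append]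
      simp only [List.flatMap_cons, List.flatMap_nil, List.append_nil]
      simp only [if_true, if_neg heq, if_neg (by omega : ¬ ey = sy),
        show (12 : Int) + 1 = 13 by norm_num]
      rw [List.append_assoc]
      congr 1
      congr 1
      -- middle: drop the conditionals, then apply pv_mid
      have hcongr : (PySem.List.pyRange (sy + 1) ey 1).flatMap (fun year =>
            (PySem.List.pyRange (if year = sy then sm else 1)
                ((if year = ey then em else 12) + 1) 1).map (fun month => pvEntry yk mk year month))
          = (PySem.List.pyRange (sy + 1) ey 1).flatMap (fun y =>
              (PySem.List.pyRange 1 13 1).map (fun m => pvEntry yk mk y m)) := by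
        apply pv_flatMap_congr
        intro y hy
        rw [PySem.List.mem_pyRange_one] at hy
        rw [if_neg (by omega), if_neg (by omega), show (12 : Int) + 1 = 13 by norm_num]
      rw [hcongr]
      have hn : ey = (sy + 1) + ((ey - (sy + 1)).toNat : Int) := by omega
      have := pv_mid yk mk (ey - (sy + 1)).toNat (sy + 1)
      rw [← hn] at this
      exact this
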